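-- pv_equiv track=rewrite | github.com/EurekaJu/py2019 | A2/AnJu30391113.py | fillWithMagnets
-- ===== SOURCE A (Python) =====
-- def canPlacePole(row, col, pole, workingBoard):
--     M= len (workingBoard)
--     N= len (workingBoard[0])
--
--     if (row>M-1 or col>N-1):
--         return False
--
--     # check surrounding squares (diagonals are not checked )
--     if ((row > 0 and workingBoard[row - 1][col] == pole) or (row < M - 1 and workingBoard[row + 1][col] == pole) or
--     (col > 0 and workingBoard[row][col - 1] == pole)or(col < N - 1 and workingBoard[row][col + 1] == pole)):
--         return False
--     return True
--
-- def fillWithMagnets(orientations):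
--     M= len (orientations)
--     N= len (orientations[0])
--     # Create a new M by N  empty workingBoard
--     # be mindful of copying
--     workingBoard=[[''] * N for i in range(M)]
--
--     for rowCounter in range(M):
--         for colCounter in range(N):
--             if (canPlacePole(rowCounter,colCounter,'+',workingBoard)):
--                 workingBoard[rowCounter][colCounter]='+'
--             else:
--                 workingBoard[rowCounter][colCounter]='-'
--
--     return workingBoard
-- ===== SOURCE B (Python) =====
-- def fillWithMagnets(orientations):
--     M = len(orientations)
--     N = len(orientations[0])
--     # the greedy in row-major order produces a pure checkerboard starting with '+'
--     return [['+' if (i + j) % 2 == 0 else '-' for j in range(N)] for i in range(M)]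
-- ===== Notes on version B (the rewrite author's own statement) =====
-- stated objective: simpler
-- what changed: Replaces the stateful greedy (empty board, canPlacePole neighbour checks, in-place writes) by the closed-form parity formula: cell (i,j) is '+' iff (i+j) is even.
import Mathlib
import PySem

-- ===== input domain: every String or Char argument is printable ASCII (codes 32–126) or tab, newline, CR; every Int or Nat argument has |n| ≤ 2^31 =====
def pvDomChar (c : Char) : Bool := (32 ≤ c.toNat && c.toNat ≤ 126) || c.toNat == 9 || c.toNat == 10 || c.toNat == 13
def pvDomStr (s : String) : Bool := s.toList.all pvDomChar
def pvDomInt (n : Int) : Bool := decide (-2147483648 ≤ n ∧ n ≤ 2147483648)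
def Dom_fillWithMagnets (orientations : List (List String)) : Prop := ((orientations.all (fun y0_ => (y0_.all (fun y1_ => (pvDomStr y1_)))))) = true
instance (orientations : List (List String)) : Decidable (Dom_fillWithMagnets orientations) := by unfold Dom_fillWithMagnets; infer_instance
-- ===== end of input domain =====

-- B replaces A's stateful greedy filling by the closed-form checkerboard parity formula (simpler).

-- ===== PORT A =====
-- literal transliteration of canPlacePole; len(workingBoard[0]) read via headD (A only calls it on nonempty boards)
def canPlacePole (row col : Nat) (pole : String) (workingBoard : List (List String)) : Bool :=
  let M := workingBoard.length
  let N := (workingBoard.headD []).length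
  if row > M - 1 || col > N - 1 then false
  else if (row > 0 && ((workingBoard.getD (row - 1) []).getD col "" == pole)) ||
          (decide (row < M - 1) && ((workingBoard.getD (row + 1) []).getD col "" == pole)) ||
          (col > 0 && ((workingBoard.getD row []).getD (col - 1) "" == pole)) ||
          (decide (col < N - 1) && ((workingBoard.getD row []).getD (col + 1) "" == pole)) then false
  else true

def fillWithMagnets (orientations : List (List String)) : List (List String) :=
  let M := orientations.length
  let N := (orientations.headD []).length
  let workingBoard := List.replicate M (List.replicate N "")
  (List.range M).foldl (fun wb rowCounter =>
    (List.range N).foldl (fun wb colCounter =>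
      if canPlacePole rowCounter colCounter "+" wb then
        wb.set rowCounter ((wb.getD rowCounter []).set colCounter "+")
      else
        wb.set rowCounter ((wb.getD rowCounter []).set colCounter "-")) wb) workingBoard

-- ===== PORT B =====
def fillWithMagnets_alt (orientations : List (List String)) : List (List String) :=
  let M := orientations.length
  let N := (orientations.headD []).length
  (List.range M).map (fun i => (List.range N).map (fun j => if (i + j) % 2 == 0 then "+" else "-"))

-- ===== PRECONDITION & SPEC =====
-- Pre_ excludes only the empty list, on which Python A (and B alike) raise IndexError at orientations[0].
def Pre_fillWithMagnets (orientations : List (List String)) : Prop := orientations ≠ []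
instance (orientations : List (List String)) : Decidable (Pre_fillWithMagnets orientations) := by unfold Pre_fillWithMagnets; infer_instance
def pvWitness_fillWithMagnets : List (List String) := [["a", "b"], ["c", "d"]]

def Spec_fillWithMagnets (orientations : List (List String)) (out : List (List String)) : Prop := out = fillWithMagnets_alt orientations
instance (orientations : List (List String)) (out : List (List String)) : Decidable (Spec_fillWithMagnets orientations out) := by unfold Spec_fillWithMagnets; infer_instance

-- ===== CLAIM (what is proved, stated in full; the proofs are below) =====
def Claim_equal_fillWithMagnets : Prop := ∀ (orientations : List (List String)), Dom_fillWithMagnets orientations → Pre_fillWithMagnets orientations → Spec_fillWithMagnets orientations (fillWithMagnets orientations)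

-- ===== LEMMAS AND PROOFS =====

-- checkerboard cell value
def cellVal (i j : Nat) : String := if (i + j) % 2 == 0 then "+" else "-"

-- the board with the first k cells (row-major order) filled with the checkerboard value, the rest ""
def pBoard (M N k : Nat) : List (List String) :=
  (List.range M).map (fun i => (List.range N).map (fun j => if i * N + j < k then cellVal i j else ""))

theorem pBoard_length (M N k : Nat) : (pBoard M N k).length = M := by
  simp [pBoard]

theorem pBoard_getD_row (M N k i : Nat) (hi : i < M) :
    (pBoard M N k).getD i [] = (List.range N).map (fun j => if i * N + j < k then cellVal i j else "") := by
  simp [pBoard, List.getD, hi]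

theorem pBoard_lookup (M N k i j : Nat) :
    ((pBoard M N k).getD i []).getD j "" =
      (if i < M ∧ j < N ∧ i * N + j < k then cellVal i j else "") := by
  by_cases hi : i < M
  · rw [pBoard_getD_row M N k i hi]
    by_cases hj : j < N
    · simp [List.getD, hi, hj]
    · rw [List.getD_eq_default]
      · simp [hj]
      · simpa using Nat.le_of_not_lt hj
  · have hnone : (pBoard M N k)[i]? = none := by
      apply List.getElem?_eq_none
      rw [pBoard_length]; exact Nat.le_of_not_lt hi
    simp [List.getD, hnone, hi]

theorem pBoard_headD (M N k : Nat) (hM : 0 < M) :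
    ((pBoard M N k).headD []).length = N := by
  have h0 := pBoard_getD_row M N k 0 hM
  cases hE : pBoard M N k with
  | nil =>
    have hlen := pBoard_length M N k
    rw [hE] at hlen
    simp at hlen
    omega
  | cons x xs =>
    rw [hE] at h0
    simp [List.getD] at h0
    simp [h0]

-- canPlacePole on the partially filled board reduces to the parity of r + c
theorem canPlace_parity (M N r c : Nat) (hr : r < M) (hc : c < N) :
    canPlacePole r c "+" (pBoard M N (r * N + c)) = decide ((r + c) % 2 = 0) := by
  have hN : 0 < N := Nat.lt_of_le_of_lt (Nat.zero_le c) hc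
  have hM : 0 < M := Nat.lt_of_le_of_lt (Nat.zero_le r) hr
  unfold canPlacePole
  simp only [pBoard_length, pBoard_headD M N _ hM, pBoard_lookup]
  have hb : ¬ (decide (r > M - 1) || decide (c > N - 1)) = true := by simp; omega
  rw [if_neg hb]
  have hup : r > 0 → (r - 1) * N + c < r * N + c := by
    intro h
    have h1 : (r - 1 + 1) * N = (r - 1) * N + N := by ring
    have h2 : r - 1 + 1 = r := by omega
    rw [h2] at h1
    omega
  have hdown : ¬ (r + 1) * N + c < r * N + c := by
    have h1 : (r + 1) * N = r * N + N := by ring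
    omega
  by_cases hpar : (r + c) % 2 = 0
  · -- all filled neighbours have odd parity, hence are "-": placement allowed
    have hno : ¬ ((decide (r > 0) && ((if r - 1 < M ∧ c < N ∧ (r - 1) * N + c < r * N + c then cellVal (r - 1) c else "") == "+")) ||
          (decide (r < M - 1) && ((if r + 1 < M ∧ c < N ∧ (r + 1) * N + c < r * N + c then cellVal (r + 1) c else "") == "+")) ||
          (decide (c > 0) && ((if r < M ∧ c - 1 < N ∧ r * N + (c - 1) < r * N + c then cellVal r (c - 1) else "") == "+")) ||
          (decide (c < N - 1) && ((if r < M ∧ c + 1 < N ∧ r * N + (c + 1) < r * N + c then cellVal r (c + 1) else "") == "+"))) = true := by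
      simp only [Bool.or_eq_true, Bool.and_eq_true, decide_eq_true_eq]
      rintro (((⟨h0, hq⟩ | ⟨h0, hq⟩) | ⟨h0, hq⟩) | ⟨h0, hq⟩)
      · rw [if_pos ⟨by omega, hc, hup (by omega)⟩] at hq
        have hx : (r - 1 + c) % 2 = 1 := by omega
        simp [cellVal, hx] at hq
      · rw [if_neg (fun h => hdown h.2.2)] at hq
        simp at hq
      · rw [if_pos ⟨hr, by omega, by omega⟩] at hq
        have hx : (r + (c - 1)) % 2 = 1 := by omega
        simp [cellVal, hx] at hq
      · rw [if_neg (by omega)] at hq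
        simp at hq
    rw [if_neg hno]
    simp [hpar]
  · -- (r+c) odd: r > 0 or c > 0, and that already-filled neighbour is "+": placement refused
    have hyes : ((decide (r > 0) && ((if r - 1 < M ∧ c < N ∧ (r - 1) * N + c < r * N + c then cellVal (r - 1) c else "") == "+")) ||
          (decide (r < M - 1) && ((if r + 1 < M ∧ c < N ∧ (r + 1) * N + c < r * N + c then cellVal (r + 1) c else "") == "+")) ||
          (decide (c > 0) && ((if r < M ∧ c - 1 < N ∧ r * N + (c - 1) < r * N + c then cellVal r (c - 1) else "") == "+")) ||
          (decide (c < N - 1) && ((if r < M ∧ c + 1 < N ∧ r * N + (c + 1) < r * N + c then cellVal r (c + 1) else "") == "+"))) = true := by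
      simp only [Bool.or_eq_true, Bool.and_eq_true, decide_eq_true_eq]
      by_cases hc0 : c > 0
      · refine Or.inl (Or.inr ⟨hc0, ?_⟩)
        rw [if_pos ⟨hr, by omega, by omega⟩]
        have hx : (r + (c - 1)) % 2 = 0 := by omega
        simp [cellVal, hx]
      · have hr0 : r > 0 := by omega
        refine Or.inl (Or.inl (Or.inl ⟨hr0, ?_⟩))
        rw [if_pos ⟨by omega, hc, hup hr0⟩]
        have hx : (r - 1 + c) % 2 = 0 := by omega
        simp [cellVal, hx]
    rw [if_pos hyes]
    simp [hpar]

-- writing cellVal r c into cell (r,c) of the board filled up to r*N+c advances it one cell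
theorem pBoard_set (M N r c : Nat) (hr : r < M) (hc : c < N) :
    (pBoard M N (r * N + c)).set r (((pBoard M N (r * N + c)).getD r []).set c (cellVal r c))
      = pBoard M N (r * N + c + 1) := by
  rw [pBoard_getD_row M N _ r hr]
  apply List.ext_getElem
  · simp [pBoard]
  · intro i hi1 hi2
    have hiM : i < M := by simpa [pBoard] using hi2
    rw [List.getElem_set]
    by_cases hir : r = i
    · subst hir
      rw [if_pos rfl]
      simp only [pBoard, List.getElem_map, List.getElem_range]
      apply List.ext_getElem
      · simp
      · intro j hj1 hj2
        have hjN : j < N := by simpa using hj2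
        rw [List.getElem_set]
        by_cases hjc : c = j
        · subst hjc; simp
        · rw [if_neg hjc]
          simp only [List.getElem_map, List.getElem_range]
          have hx : (r * N + j < r * N + c) = (r * N + j < r * N + c + 1) := by
            apply propext; constructor <;> intro <;> omega
          simp only [hx]
    · rw [if_neg hir]
      simp only [pBoard, List.getElem_map, List.getElem_range]
      apply List.map_congr_left
      intro j hj
      have hjN : j < N := List.mem_range.mp hj
      rcases Nat.lt_or_ge i r with h | h
      · have h1 : (i + 1) * N = i * N + N := by ring
        have h2 : (i + 1) * N ≤ r * N := Nat.mul_le_mul_right N (by omega)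
        have hx : (i * N + j < r * N + c) = (i * N + j < r * N + c + 1) := by
          apply propext; constructor <;> intro <;> omega
        simp only [hx]
      · have hgt : r < i := by omega
        have h1 : (r + 1) * N = r * N + N := by ring
        have h2 : (r + 1) * N ≤ i * N := Nat.mul_le_mul_right N (by omega)
        have hx : (i * N + j < r * N + c) = (i * N + j < r * N + c + 1) := by
          apply propext; constructor <;> intro <;> omega
        simp only [hx]

-- one cell of the inner loop
theorem step_cell (M N r c : Nat) (hr : r < M) (hc : c < N) :
    (if canPlacePole r c "+" (pBoard M N (r * N + c)) then
        (pBoard M N (r * N + c)).set r (((pBoard M N (r * N + c)).getD r []).set c "+")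
      else
        (pBoard M N (r * N + c)).set r (((pBoard M N (r * N + c)).getD r []).set c "-"))
      = pBoard M N (r * N + c + 1) := by
  rw [canPlace_parity M N r c hr hc]
  by_cases h : (r + c) % 2 = 0
  · rw [if_pos (by simp [h])]
    have hv : ("+" : String) = cellVal r c := by simp [cellVal, h]
    rw [hv, pBoard_set M N r c hr hc]
  · rw [if_neg (by simp [h])]
    have hv : ("-" : String) = cellVal r c := by simp [cellVal, h]
    rw [hv, pBoard_set M N r c hr hc]

-- the inner loop over columns a, a+1, …, a+b-1
theorem inner_loop (M N r : Nat) (hr : r < M) :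
    ∀ (b a : Nat), a + b ≤ N →
    (List.range' a b).foldl (fun wb colCounter =>
      if canPlacePole r colCounter "+" wb then
        wb.set r ((wb.getD r []).set colCounter "+")
      else
        wb.set r ((wb.getD r []).set colCounter "-")) (pBoard M N (r * N + a))
      = pBoard M N (r * N + (a + b)) := by
  intro b
  induction b with
  | zero => intro a ha; simp
  | succ n ih =>
    intro a ha
    rw [List.range'_succ, List.foldl_cons, step_cell M N r a hr (by omega)]
    have hnext := ih (a + 1) (by omega)
    rw [show r * N + a + 1 = r * N + (a + 1) from by omega, hnext]
    congr 1
    omega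

-- the outer loop over rows a, a+1, …, a+b-1
theorem outer_loop (M N : Nat) :
    ∀ (b a : Nat), a + b ≤ M →
    (List.range' a b).foldl (fun wb rowCounter =>
      (List.range N).foldl (fun wb colCounter =>
        if canPlacePole rowCounter colCounter "+" wb then
          wb.set rowCounter ((wb.getD rowCounter []).set colCounter "+")
        else
          wb.set rowCounter ((wb.getD rowCounter []).set colCounter "-")) wb) (pBoard M N (a * N))
      = pBoard M N ((a + b) * N) := by
  intro b
  induction b with
  | zero => intro a ha; simp
  | succ n ih =>
    intro a ha
    rw [List.range'_succ, List.foldl_cons]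
    have hstep : (List.range N).foldl (fun wb colCounter =>
        if canPlacePole a colCounter "+" wb then
          wb.set a ((wb.getD a []).set colCounter "+")
        else
          wb.set a ((wb.getD a []).set colCounter "-")) (pBoard M N (a * N))
        = pBoard M N ((a + 1) * N) := by
      have hin := inner_loop M N a (by omega) N 0 (by omega)
      rw [List.range_eq_range']
      have h1 : (a + 1) * N = a * N + N := by ring
      simpa [h1] using hin
    rw [hstep]
    have hnext := ih (a + 1) (by omega)
    rw [hnext]
    have h2 : a + 1 + n = a + (n + 1) := by omega
    rw [h2]

theorem pBoard_zero (M N : Nat) :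
    List.replicate M (List.replicate N "") = pBoard M N 0 := by
  apply List.ext_getElem
  · simp [pBoard]
  · intro i hi1 hi2
    simp [pBoard]

theorem pBoard_full (M N : Nat) :
    pBoard M N (M * N) =
      (List.range M).map (fun i => (List.range N).map (fun j => if (i + j) % 2 == 0 then "+" else "-")) := by
  unfold pBoard
  apply List.map_congr_left
  intro i hi
  have hiM : i < M := List.mem_range.mp hi
  apply List.map_congr_left
  intro j hj
  have hjN : j < N := List.mem_range.mp hj
  have h1 : (i + 1) * N = i * N + N := by ring
  have h2 : (i + 1) * N ≤ M * N := Nat.mul_le_mul_right N (by omega)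
  have hlt : i * N + j < M * N := by omega
  simp [hlt, cellVal]

-- ===== VERDICT (by name: the statement is the Claim_ definition above) =====
theorem fillWithMagnets_spec : Claim_equal_fillWithMagnets := by
  intro orientations _ _
  simp only [Spec_fillWithMagnets, fillWithMagnets, fillWithMagnets_alt]
  rw [pBoard_zero]
  have hout := outer_loop orientations.length (orientations.headD []).length orientations.length 0 (by omega)
  rw [← List.range_eq_range'] at hout
  simp only [Nat.zero_mul, Nat.zero_add] at hout
  rw [hout, pBoard_full]
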